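-- pv_equiv track=rewrite | github.com/joakimtosteberg/aoc2024 | 21/day21.py | get_paths
-- ===== SOURCE A (Python) =====
-- def get_paths(grid, directions):
--     grid_paths = {}
--     for start_pos in grid:
--         next_positions = [start_pos]
--         start_val = grid[start_pos]
--         while next_positions:
--             positions = next_positions
--             next_positions = list()
--
--             new_grid_paths = {}
--             for pos in positions:
--                 val = grid[pos]
--                 for step in directions:
--                     next_pos = (pos[0]+step[0], pos[1]+step[1])
--                     if next_pos not in grid or next_pos == start_pos:
--                         continue
--                     next_val = grid[next_pos]
--                     if (start_val,next_val) in grid_paths: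
--                         continue
--                     if (start_val,next_val) not in new_grid_paths:
--                         new_grid_paths[(start_val,next_val)] = set()
--                     new_grid_paths[(start_val,next_val)].update([l + directions[step] for l in grid_paths.get((start_val,val), [""])])
--                     next_positions.append(next_pos)
--
--             for key, paths in new_grid_paths.items():
--                 grid_paths[key] = paths
--
--     return grid_paths
-- ===== SOURCE B (Python) =====
-- def get_paths(grid, directions):
--     grid_paths = {}
--     for start_pos in grid:
--         start_val = grid[start_pos]
--         positions = [start_pos]
--         while positions:
--             # Flat pass 1: all admissible moves of this BFS level, in scan order.
--             moves = [(pos, step)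
--                      for pos in positions
--                      for step in directions
--                      if (pos[0] + step[0], pos[1] + step[1]) in grid
--                      and (pos[0] + step[0], pos[1] + step[1]) != start_pos
--                      and (start_val, grid[(pos[0] + step[0], pos[1] + step[1])]) not in grid_paths]
--
--             def key_of(move):
--                 pos, step = move
--                 return (start_val, grid[(pos[0] + step[0], pos[1] + step[1])])
--
--             # Flat pass 2: group-by — one aggregated path set per newly reached value.
--             entries = []
--             for key in dict.fromkeys(map(key_of, moves)):
--                 paths = set()
--                 for move in moves:
--                     if key_of(move) == key:
--                         pos, step = move
--                         paths.update(l + directions[step]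
--                                      for l in grid_paths.get((start_val, grid[pos]), [""]))
--                 entries.append((key, paths))
--
--             grid_paths.update(entries)
--             positions = [(pos[0] + step[0], pos[1] + step[1]) for pos, step in moves]
--     return grid_paths
-- ===== Notes on version B (the rewrite author's own statement) =====
-- stated objective: alternative
-- what changed: A accumulates each BFS level interleaved per (position, direction) into a mutable dict of sets built alongside the frontier; B first builds the flat list of admissible moves of the level by a comprehension, derives the next frontier by a map, and then aggregates one path set per newly reached value with a separate group-by pass over the moves.
import Mathlib
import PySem

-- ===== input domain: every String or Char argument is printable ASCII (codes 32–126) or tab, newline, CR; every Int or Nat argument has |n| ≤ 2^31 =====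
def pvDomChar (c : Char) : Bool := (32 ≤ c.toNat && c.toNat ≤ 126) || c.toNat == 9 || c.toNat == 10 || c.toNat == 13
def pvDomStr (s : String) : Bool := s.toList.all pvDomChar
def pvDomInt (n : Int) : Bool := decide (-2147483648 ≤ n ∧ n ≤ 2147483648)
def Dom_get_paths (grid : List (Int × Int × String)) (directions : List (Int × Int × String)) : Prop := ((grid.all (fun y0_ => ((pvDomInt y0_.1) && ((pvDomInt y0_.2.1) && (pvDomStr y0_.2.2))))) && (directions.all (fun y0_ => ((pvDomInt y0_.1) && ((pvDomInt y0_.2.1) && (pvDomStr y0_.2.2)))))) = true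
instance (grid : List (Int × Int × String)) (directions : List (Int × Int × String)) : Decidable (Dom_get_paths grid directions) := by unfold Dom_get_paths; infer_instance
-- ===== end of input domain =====

-- B replaces A's interleaved dict-of-sets accumulation inside the BFS level by a flat moves
-- comprehension followed by a group-by-key aggregation pass (objective: alternative decomposition,
-- same asymptotic cost).

-- ===== PORT A =====
def pvNext (p s : Int × Int) : Int × Int := (p.1 + s.1, p.2 + s.2)

-- body of A's innermost 'for step in directions' loop (val = grid[pos], computed per pos)
def pvBodyA (gridD dirsD : PySem.Dict (Int × Int) String) (sp : Int × Int) (sv val : String)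
    (gp : PySem.Dict (String × String) (PySem.Set String))
    (acc : List (Int × Int) × PySem.Dict (String × String) (PySem.Set String))
    (pos step : Int × Int) :
    List (Int × Int) × PySem.Dict (String × String) (PySem.Set String) :=
  let np := pvNext pos step
  if !gridD.contains np || np == sp then acc
  else
    let nv := (gridD.get? np).getD ""
    if gp.contains (sv, nv) then acc
    else
      let ngp := if acc.2.contains (sv, nv) then acc.2 else acc.2.insert (sv, nv) PySem.Set.empty
      let ngp := ngp.modify (sv, nv) PySem.Set.empty
        (fun s => PySem.Set.update s
          (((gp.get? (sv, val)).getD [""]).map (fun l => l ++ (dirsD.get? step).getD "")))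
      (acc.1 ++ [np], ngp)

-- one round of A's 'while next_positions' loop: returns (next_positions, new_grid_paths)
def pvLevelA (gridD dirsD : PySem.Dict (Int × Int) String) (sp : Int × Int) (sv : String)
    (gp : PySem.Dict (String × String) (PySem.Set String)) (positions : List (Int × Int)) :
    List (Int × Int) × PySem.Dict (String × String) (PySem.Set String) :=
  positions.foldl
    (fun acc pos =>
      let val := (gridD.get? pos).getD ""
      dirsD.keys.foldl (fun acc step => pvBodyA gridD dirsD sp sv val gp acc pos step) acc)
    ([], PySem.Dict.mk [])

def pvLoopA (gridD dirsD : PySem.Dict (Int × Int) String) (sp : Int × Int) (sv : String) :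
    Nat → List (Int × Int) → PySem.Dict (String × String) (PySem.Set String) →
    PySem.Dict (String × String) (PySem.Set String)
  | 0, _, gp => gp
  | Nat.succ fuel, positions, gp =>
    if positions.isEmpty then gp
    else
      let r := pvLevelA gridD dirsD sp sv gp positions
      pvLoopA gridD dirsD sp sv fuel r.1 (gp.update r.2.items)

def get_paths (grid : List (Int × Int × String)) (directions : List (Int × Int × String)) : List (String × String × List String) :=
  let gridD := PySem.Dict.ofList (grid.map (fun e => ((e.1, e.2.1), e.2.2)))
  let dirsD := PySem.Dict.ofList (directions.map (fun e => ((e.1, e.2.1), e.2.2)))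
  -- fuel: each loop round with a nonempty frontier adds a fresh (start_val, val) key, so
  -- grid.length + 2 rounds always suffice (the loop body itself is A's, unchanged)
  let gp := gridD.keys.foldl
    (fun gp sp => pvLoopA gridD dirsD sp ((gridD.get? sp).getD "") (grid.length + 2) [sp] gp)
    (PySem.Dict.mk [])
  gp.items.map (fun p => (p.1.1, p.1.2, p.2))

-- ===== PORT B =====
def pvNextB (p s : Int × Int) : Int × Int := (p.1 + s.1, p.2 + s.2)

def pvValidB (gridD : PySem.Dict (Int × Int) String)
    (gp : PySem.Dict (String × String) (PySem.Set String)) (sp : Int × Int) (sv : String)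
    (pos step : Int × Int) : Bool :=
  gridD.contains (pvNextB pos step) && pvNextB pos step != sp &&
    !gp.contains (sv, (gridD.get? (pvNextB pos step)).getD "")

def pvKeyB (gridD : PySem.Dict (Int × Int) String) (sv : String) (m : (Int × Int) × (Int × Int)) :
    String × String :=
  (sv, (gridD.get? (pvNextB m.1 m.2)).getD "")

def pvMovesB (gridD dirsD : PySem.Dict (Int × Int) String) (sp : Int × Int) (sv : String)
    (gp : PySem.Dict (String × String) (PySem.Set String)) (positions : List (Int × Int)) :
    List ((Int × Int) × (Int × Int)) :=
  positions.flatMap (fun pos =>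
    (dirsD.keys.filter (fun step => pvValidB gridD gp sp sv pos step)).map (fun step => (pos, step)))

def pvAddPathsB (gridD dirsD : PySem.Dict (Int × Int) String) (sv : String)
    (gp : PySem.Dict (String × String) (PySem.Set String))
    (s : PySem.Set String) (m : (Int × Int) × (Int × Int)) : PySem.Set String :=
  PySem.Set.update s
    (((gp.get? (sv, (gridD.get? m.1).getD "")).getD [""]).map (fun l => l ++ (dirsD.get? m.2).getD ""))

def pvEntriesB (gridD dirsD : PySem.Dict (Int × Int) String) (sv : String)
    (gp : PySem.Dict (String × String) (PySem.Set String)) (moves : List ((Int × Int) × (Int × Int))) :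
    List ((String × String) × PySem.Set String) :=
  (PySem.List.dedup (moves.map (pvKeyB gridD sv))).map (fun k =>
    (k, moves.foldl (fun s m => if pvKeyB gridD sv m == k then pvAddPathsB gridD dirsD sv gp s m else s)
          PySem.Set.empty))

def pvLoopB (gridD dirsD : PySem.Dict (Int × Int) String) (sp : Int × Int) (sv : String) :
    Nat → List (Int × Int) → PySem.Dict (String × String) (PySem.Set String) →
    PySem.Dict (String × String) (PySem.Set String)
  | 0, _, gp => gp
  | Nat.succ fuel, positions, gp =>
    if positions.isEmpty then gp
    else
      let moves := pvMovesB gridD dirsD sp sv gp positions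
      pvLoopB gridD dirsD sp sv fuel (moves.map (fun m => pvNextB m.1 m.2))
        (gp.update (pvEntriesB gridD dirsD sv gp moves))

def get_paths_alt (grid : List (Int × Int × String)) (directions : List (Int × Int × String)) : List (String × String × List String) :=
  let gridD := PySem.Dict.ofList (grid.map (fun e => ((e.1, e.2.1), e.2.2)))
  let dirsD := PySem.Dict.ofList (directions.map (fun e => ((e.1, e.2.1), e.2.2)))
  let gp := gridD.keys.foldl
    (fun gp sp => pvLoopB gridD dirsD sp ((gridD.get? sp).getD "") (grid.length + 2) [sp] gp)
    (PySem.Dict.mk [])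
  gp.items.map (fun p => (p.1.1, p.1.2, p.2))

-- ===== PRECONDITION & SPEC =====
def Spec_get_paths (grid : List (Int × Int × String)) (directions : List (Int × Int × String)) (out : List (String × String × List String)) : Prop := out = get_paths_alt grid directions
instance (grid : List (Int × Int × String)) (directions : List (Int × Int × String)) (out : List (String × String × List String)) : Decidable (Spec_get_paths grid directions out) := by unfold Spec_get_paths; infer_instance

-- ===== CLAIM (what is proved, stated in full; the proofs are below) =====
def Claim_equal_get_paths : Prop := ∀ (grid : List (Int × Int × String)) (directions : List (Int × Int × String)), Dom_get_paths grid directions → Spec_get_paths grid directions (get_paths grid directions)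

-- ===== LEMMAS AND PROOFS =====



theorem pv_foldl_pairs {σ : Type} (positions L : List (Int × Int))
    (g : σ → (Int × Int) → (Int × Int) → σ) (a : σ) :
    positions.foldl (fun acc p => L.foldl (fun acc s => g acc p s) acc) a
      = (positions.flatMap (fun p => L.map (fun s => (p, s)))).foldl (fun acc m => g acc m.1 m.2) a := by
  induction positions generalizing a with
  | nil => rfl
  | cons p ps ih => simp [List.foldl_append, List.foldl_map, ih]

theorem pv_filter_flatMap (positions L : List (Int × Int)) (q : (Int × Int) → (Int × Int) → Bool) :
    (positions.flatMap (fun p => (L.filter (q p)).map (fun s => (p, s))))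
      = (positions.flatMap (fun p => L.map (fun s => (p, s)))).filter (fun m => q m.1 m.2) := by
  induction positions with
  | nil => rfl
  | cons p ps ih =>
    simp only [List.flatMap_cons, List.filter_append, ih, List.filter_map]
    rfl

theorem pv_ite_insert_modify {κ ν : Type} [BEq κ] [LawfulBEq κ]
    (d : PySem.Dict κ ν) (k : κ) (dflt : ν) (f : ν → ν) :
    (if d.contains k then d else d.insert k dflt).modify k dflt f = d.modify k dflt f := by
  by_cases h : d.contains k = true
  · simp [h]
  · have h' : d.contains k = false := by simpa using h
    simp [h', PySem.Dict.modify, PySem.Dict.getD_insert_self, PySem.Dict.insert_insert_self,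
      PySem.Dict.getD_of_not_contains _ _ h']

-- group-by characterisation of a modify-accumulation loop over an empty initial dict
theorem pv_group {α κ σ : Type} [BEq κ] [LawfulBEq κ]
    (key : α → κ) (S : σ → α → σ) (s0 : σ) (l : List α) :
    l.foldl (fun d x => d.modify (key x) s0 (fun s => S s x)) (PySem.Dict.mk [])
      = PySem.Dict.mk ((PySem.List.dedup (l.map key)).map
          (fun k => (k, (l.filter (fun x => key x == k)).foldl S s0))) := by
  induction l using List.reverseRecOn with
  | nil => rfl
  | append_singleton l x ih =>
    rw [List.foldl_append, ih]
    simp only [PySem.List.dedup, List.map_append, List.map_cons, List.map_nil]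
    rw [PySem.Set.ofList_append_singleton]
    set kl := PySem.Set.ofList (List.map key l) with hkl
    set F := fun k => (k, (l.filter (fun z => key z == k)).foldl S s0) with hF
    have hnd : kl.Nodup := PySem.Set.nodup_ofList _
    have hkeys : (PySem.Dict.mk (kl.map F)).keys = kl := by
      simp [PySem.Dict.keys, List.map_map, hF, Function.comp_def]
    by_cases hmem : key x ∈ kl
    · rw [PySem.Set.add_of_mem hmem]
      have hcont : (PySem.Dict.mk (kl.map F)).contains (key x) = true := by
        simp only [PySem.Dict.contains, List.any_map, List.any_eq_true]
        exact ⟨key x, hmem, by simp [hF]⟩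
      simp only [List.foldl_cons, List.foldl_nil, PySem.Dict.modify]
      rw [PySem.Dict.getD_of_mem_items (d := PySem.Dict.mk (kl.map F)) (k := key x)
          (v := (l.filter (fun z => key z == key x)).foldl S s0)
          (List.mem_map.mpr ⟨key x, hmem, rfl⟩) (by rw [hkeys]; exact hnd) s0]
      apply PySem.Dict.ext
      rw [PySem.Dict.items_insert_of_contains _ _ hcont]
      show List.map _ (List.map F kl) = List.map _ kl
      rw [List.map_map]
      apply List.map_congr_left
      intro k hk
      by_cases hkx : k = key x
      · subst hkx
        simp [hF, List.filter_append, List.foldl_append]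
      · have hb : (k == key x) = false := by simp [hkx]
        have hb2 : (key x == k) = false := by
          simp only [beq_eq_false_iff_ne, ne_eq]
          exact fun h => hkx h.symm
        simp [hF, hb, hb2, List.filter_append]
    · rw [PySem.Set.add_of_not_mem hmem]
      have hnotin : key x ∉ List.map key l := fun h => hmem ((PySem.Set.mem_ofList _ _).mpr h)
      have hcont : (PySem.Dict.mk (kl.map F)).contains (key x) = false := by
        simp only [PySem.Dict.contains, List.any_map]
        rw [List.any_eq_false]
        intro k hkmem
        have hne : k ≠ key x := fun h => hmem (h ▸ hkmem)
        simp [hF, hne]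
      simp only [List.foldl_cons, List.foldl_nil, PySem.Dict.modify]
      rw [PySem.Dict.getD_of_not_contains _ _ hcont]
      apply PySem.Dict.ext
      rw [PySem.Dict.items_insert_of_not_contains _ _ hcont]
      rw [List.map_append]
      congr 1
      · apply List.map_congr_left
        intro k hk
        have hkx : (key x == k) = false := by
          simp only [beq_eq_false_iff_ne, ne_eq]
          exact fun h => hmem (h ▸ hk)
        simp [hF, List.filter_append, hkx]
      · have hfl : l.filter (fun z => key z == key x) = [] := by
          rw [List.filter_eq_nil_iff]
          intro z hz hcontra
          exact hnotin (List.mem_map.mpr ⟨z, hz, by simpa using hcontra⟩)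
        simp [List.filter_append, List.foldl_append, hfl]

theorem pvNextB_eq (p s : Int × Int) : pvNextB p s = pvNext p s := rfl

theorem pv_body_if (gridD dirsD : PySem.Dict (Int × Int) String) (sp : Int × Int) (sv : String)
    (gp : PySem.Dict (String × String) (PySem.Set String))
    (acc : List (Int × Int) × PySem.Dict (String × String) (PySem.Set String))
    (pos step : Int × Int) :
    pvBodyA gridD dirsD sp sv ((gridD.get? pos).getD "") gp acc pos step
      = if pvValidB gridD gp sp sv pos step
        then (acc.1 ++ [pvNext pos step],
              acc.2.modify (pvKeyB gridD sv (pos, step)) PySem.Set.empty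
                (fun s => pvAddPathsB gridD dirsD sv gp s (pos, step)))
        else acc := by
  unfold pvBodyA pvValidB pvKeyB pvAddPathsB
  simp only [pvNextB_eq]
  by_cases h1 : gridD.contains (pvNext pos step) = true
  · by_cases h2 : pvNext pos step = sp
    · simp [h2]
    · by_cases h3 : gp.contains (sv, (gridD.get? (pvNext pos step)).getD "") = true
      · simp [h1, h2, h3]
      · simp [h1, h2, h3, pv_ite_insert_modify]
  · simp [h1]

theorem pv_level_eq (gridD dirsD : PySem.Dict (Int × Int) String) (sp : Int × Int) (sv : String)
    (gp : PySem.Dict (String × String) (PySem.Set String)) (positions : List (Int × Int)) :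
    pvLevelA gridD dirsD sp sv gp positions =
      ((pvMovesB gridD dirsD sp sv gp positions).map (fun m => pvNextB m.1 m.2),
       PySem.Dict.mk (pvEntriesB gridD dirsD sv gp (pvMovesB gridD dirsD sp sv gp positions))) := by
  unfold pvLevelA
  rw [pv_foldl_pairs (g := fun acc p s => pvBodyA gridD dirsD sp sv ((gridD.get? p).getD "") gp acc p s)]
  have hb : (fun (acc : List (Int × Int) × PySem.Dict (String × String) (PySem.Set String)) (m : (Int × Int) × (Int × Int)) =>
      pvBodyA gridD dirsD sp sv ((gridD.get? m.1).getD "") gp acc m.1 m.2)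
    = fun acc m => if pvValidB gridD gp sp sv m.1 m.2
        then (acc.1 ++ [pvNext m.1 m.2],
              acc.2.modify (pvKeyB gridD sv m) PySem.Set.empty
                (fun s => pvAddPathsB gridD dirsD sv gp s m))
        else acc := by
    funext acc m
    exact pv_body_if gridD dirsD sp sv gp acc m.1 m.2
  rw [hb, ← List.foldl_filter, ← pv_filter_flatMap]
  have hm : (positions.flatMap (fun p =>
      (dirsD.keys.filter (fun s => pvValidB gridD gp sp sv p s)).map (fun s => (p, s))))
    = pvMovesB gridD dirsD sp sv gp positions := rfl
  rw [hm]
  have hp := PySem.List.foldl_prod_mk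
    (f := fun (l : List (Int × Int)) (m : (Int × Int) × (Int × Int)) => l ++ [pvNext m.1 m.2])
    (g := fun (d : PySem.Dict (String × String) (PySem.Set String)) m =>
      d.modify (pvKeyB gridD sv m) PySem.Set.empty
        (fun s => pvAddPathsB gridD dirsD sv gp s m))
    (pvMovesB gridD dirsD sp sv gp positions) [] (PySem.Dict.mk [])
  rw [hp]
  refine Prod.ext ?_ ?_
  · exact (PySem.List.foldl_append_singleton_eq_map (fun m => pvNextB m.1 m.2)
      (pvMovesB gridD dirsD sp sv gp positions) []).trans (List.nil_append _)
  · show List.foldl (fun d m => d.modify (pvKeyB gridD sv m) PySem.Set.empty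
        (fun s => pvAddPathsB gridD dirsD sv gp s m)) (PySem.Dict.mk [])
        (pvMovesB gridD dirsD sp sv gp positions)
      = PySem.Dict.mk (pvEntriesB gridD dirsD sv gp (pvMovesB gridD dirsD sp sv gp positions))
    rw [pv_group (key := pvKeyB gridD sv) (S := pvAddPathsB gridD dirsD sv gp)]
    apply PySem.Dict.ext
    apply List.map_congr_left
    intro k _
    rw [List.foldl_filter]

theorem pv_loop_eq (gridD dirsD : PySem.Dict (Int × Int) String) (sp : Int × Int) (sv : String)
    (fuel : Nat) (positions : List (Int × Int))
    (gp : PySem.Dict (String × String) (PySem.Set String)) :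
    pvLoopA gridD dirsD sp sv fuel positions gp = pvLoopB gridD dirsD sp sv fuel positions gp := by
  induction fuel generalizing positions gp with
  | zero => rfl
  | succ n ih =>
    simp only [pvLoopA, pvLoopB]
    by_cases h : positions.isEmpty
    · simp [h]
    · simp only [h, Bool.false_eq_true, if_false]
      rw [pv_level_eq]
      exact ih _ _

theorem pv_fold_starts_eq (gridD dirsD : PySem.Dict (Int × Int) String) (n : Nat)
    (keys : List (Int × Int)) (gp0 : PySem.Dict (String × String) (PySem.Set String)) :
    keys.foldl (fun gp sp => pvLoopA gridD dirsD sp ((gridD.get? sp).getD "") n [sp] gp) gp0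
      = keys.foldl (fun gp sp => pvLoopB gridD dirsD sp ((gridD.get? sp).getD "") n [sp] gp) gp0 := by
  have h : (fun (gp : PySem.Dict (String × String) (PySem.Set String)) (sp : Int × Int) =>
        pvLoopA gridD dirsD sp ((gridD.get? sp).getD "") n [sp] gp)
      = (fun gp sp => pvLoopB gridD dirsD sp ((gridD.get? sp).getD "") n [sp] gp) :=
    funext fun gp => funext fun sp => pv_loop_eq gridD dirsD sp _ n [sp] gp
  rw [h]

-- ===== VERDICT (by name: the statement is the Claim_ definition above) =====
theorem get_paths_spec : Claim_equal_get_paths := by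
  intro grid directions _
  show get_paths grid directions = get_paths_alt grid directions
  unfold get_paths get_paths_alt
  simp only []
  rw [pv_fold_starts_eq]
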